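-- pv_equiv track=rewrite | github.com/Erhezi/A10-PLMTracker | app/dashboard/routes.py | _filter_export_columns
-- ===== SOURCE A (Python) =====
-- def _filter_export_columns(
--     column_defs: list[tuple[str, str]],
--     requested_fields: list[str],
-- ) -> list[tuple[str, str]]:
--     if not requested_fields:
--         return []
--     lookup = {field_name: (header, field_name) for header, field_name in column_defs}
--     filtered: list[tuple[str, str]] = []
--     for field in requested_fields:
--         column = lookup.get(field)
--         if column and column not in filtered:
--             filtered.append(column)
--     return filtered
-- ===== SOURCE B (Python) =====
-- def _filter_export_columns(
--     column_defs: list[tuple[str, str]],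
--     requested_fields: list[str],
-- ) -> list[tuple[str, str]]:
--     rank = {}
--     for i, field in enumerate(requested_fields):
--         if field not in rank:
--             rank[field] = i
--     colmap = {field_name: (header, field_name) for header, field_name in column_defs}
--     candidates = [col for fn, col in colmap.items() if fn in rank]
--     return sorted(candidates, key=lambda col: rank[col[1]])
-- ===== Notes on version B (the rewrite author's own statement) =====
-- stated objective: alternative
-- what changed: Replaces A's scan of requested_fields with an inline 'column not in filtered' list scan by building a first-occurrence rank index over requested_fields, gathering the matching columns from the column map once, and sorting them by rank.
import Mathlib
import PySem

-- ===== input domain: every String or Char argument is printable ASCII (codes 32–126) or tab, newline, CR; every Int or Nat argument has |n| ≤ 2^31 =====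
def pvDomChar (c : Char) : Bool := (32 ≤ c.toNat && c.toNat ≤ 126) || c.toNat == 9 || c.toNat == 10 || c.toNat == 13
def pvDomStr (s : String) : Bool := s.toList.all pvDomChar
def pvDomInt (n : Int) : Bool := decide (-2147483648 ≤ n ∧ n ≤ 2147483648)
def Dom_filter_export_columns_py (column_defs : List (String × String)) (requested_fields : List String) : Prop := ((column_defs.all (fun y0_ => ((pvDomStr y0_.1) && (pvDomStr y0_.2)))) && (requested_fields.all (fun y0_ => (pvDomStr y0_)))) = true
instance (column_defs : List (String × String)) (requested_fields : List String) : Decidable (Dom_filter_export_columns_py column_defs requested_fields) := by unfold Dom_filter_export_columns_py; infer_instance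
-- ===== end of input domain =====

-- B replaces A's requested-order loop with an inner list scan by a first-occurrence rank
-- index plus a single sort of the column values by rank (alternative decomposition).

-- ===== PORT A =====
-- lookup = {field_name: (header, field_name) for header, field_name in column_defs}
def pvLookupA (column_defs : List (String × String)) : PySem.Dict String (String × String) :=
  column_defs.foldl (fun d p => d.insert p.2 (p.1, p.2)) PySem.Dict.empty

-- loop body: `column = lookup.get(field); if column and column not in filtered: filtered.append(column)`
-- (a found column is a nonempty tuple, hence always truthy, so `if column` = `if column is not None`)
def pvStepA (lookup : PySem.Dict String (String × String))
    (filtered : List (String × String)) (field : String) : List (String × String) :=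
  match lookup.get? field with
  | some column => if column ∈ filtered then filtered else filtered ++ [column]
  | none => filtered

def filter_export_columns_py (column_defs : List (String × String)) (requested_fields : List String) : List (String × String) :=
  if requested_fields = [] then []
  else requested_fields.foldl (pvStepA (pvLookupA column_defs)) []

-- ===== PORT B =====
-- rank = {}; for i, field in enumerate(requested_fields): if field not in rank: rank[field] = i
def pvRankB (requested_fields : List String) : PySem.Dict String Int :=
  (PySem.List.enumerate requested_fields).foldl
    (fun d p => if d.contains p.2 then d else d.insert p.2 p.1) PySem.Dict.empty

def filter_export_columns_py_alt (column_defs : List (String × String)) (requested_fields : List String) : List (String × String) :=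
  let rank := pvRankB requested_fields
  let colmap : PySem.Dict String (String × String) :=
    column_defs.foldl (fun d p => d.insert p.2 (p.1, p.2)) PySem.Dict.empty
  let candidates := (colmap.items.filter (fun p => rank.contains p.1)).map (·.2)
  -- key=lambda col: rank[col[1]]  (every candidate's field is a key of rank, so the lookup succeeds)
  PySem.List.sorted candidates (fun col => ((rank.get? col.2).getD 0)) false

-- ===== PRECONDITION & SPEC =====
def Spec_filter_export_columns_py (column_defs : List (String × String)) (requested_fields : List String) (out : List (String × String)) : Prop := out = filter_export_columns_py_alt column_defs requested_fields
instance (column_defs : List (String × String)) (requested_fields : List String) (out : List (String × String)) : Decidable (Spec_filter_export_columns_py column_defs requested_fields out) := by unfold Spec_filter_export_columns_py; infer_instance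

-- ===== CLAIM (what is proved, stated in full; the proofs are below) =====
def Claim_equal_filter_export_columns_py : Prop := ∀ (column_defs : List (String × String)) (requested_fields : List String), Dom_filter_export_columns_py column_defs requested_fields → Spec_filter_export_columns_py column_defs requested_fields (filter_export_columns_py column_defs requested_fields)

-- ===== LEMMAS AND PROOFS =====

-- the lookup dict's values carry their own key in the second component
theorem pvLookup_val_aux (l : List (String × String)) (d : PySem.Dict String (String × String))
    (hd : ∀ f c, d.get? f = some c → c.2 = f) :
    ∀ f c, (l.foldl (fun d p => d.insert p.2 (p.1, p.2)) d).get? f = some c → c.2 = f := by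
  induction l generalizing d with
  | nil => exact hd
  | cons p rest ih =>
      intro f c h
      refine ih (d.insert p.2 (p.1, p.2)) ?_ f c h
      intro f' c' h'
      rw [PySem.Dict.get?_insert] at h'
      split at h'
      · cases h'; simp_all
      · exact hd f' c' h'

theorem pvLookup_val (column_defs : List (String × String)) (f : String) (c : String × String)
    (h : (pvLookupA column_defs).get? f = some c) : c.2 = f :=
  pvLookup_val_aux column_defs PySem.Dict.empty
    (by intro f c h; simp [PySem.Dict.get?_empty] at h) f c h

theorem pvLookup_keys (column_defs : List (String × String)) :
    (pvLookupA column_defs).keys = PySem.Set.ofList (column_defs.map (·.2)) := by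
  unfold pvLookupA
  rw [PySem.Dict.keys_foldl_insert_key column_defs (fun p => p.2) (fun _ p => (p.1, p.2)) PySem.Dict.empty]
  simp [PySem.Set.update_nil_left]

theorem pvLookup_keys_nodup (column_defs : List (String × String)) :
    (pvLookupA column_defs).keys.Nodup := by
  rw [pvLookup_keys]; exact PySem.Set.nodup_ofList _

-- membership in `filterMap (lookup.get?) seen`
theorem pvMem_filterMap_g (column_defs : List (String × String)) (seen : List String)
    (c : String × String) :
    c ∈ seen.filterMap (pvLookupA column_defs).get? ↔
      (pvLookupA column_defs).get? c.2 = some c ∧ c.2 ∈ seen := by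
  rw [List.mem_filterMap]
  constructor
  · rintro ⟨a, ha, hg⟩
    have := pvLookup_val column_defs a c hg
    subst this; exact ⟨hg, ha⟩
  · rintro ⟨hg, hm⟩; exact ⟨c.2, hm, hg⟩

-- A's loop, run from an accumulator that is the image of an already-seen nodup field list
theorem pvLoopA (column_defs : List (String × String)) :
    ∀ (fs : List String) (seen : List String), seen.Nodup →
      fs.foldl (pvStepA (pvLookupA column_defs)) (seen.filterMap (pvLookupA column_defs).get?)
        = (PySem.Set.update seen fs).filterMap (pvLookupA column_defs).get? := by
  intro fs
  induction fs with
  | nil => intro seen _; simp [PySem.Set.update]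
  | cons f rest ih =>
      intro seen hnd
      have hupd : PySem.Set.update seen (f :: rest) = PySem.Set.update (PySem.Set.add seen f) rest := by
        simp [PySem.Set.update]
      rw [List.foldl_cons, hupd]
      by_cases hmem : f ∈ seen
      · have hadd : PySem.Set.add seen f = seen := PySem.Set.add_of_mem hmem
        have hstep : pvStepA (pvLookupA column_defs)
            (seen.filterMap (pvLookupA column_defs).get?) f
            = seen.filterMap (pvLookupA column_defs).get? := by
          unfold pvStepA
          cases hg : (pvLookupA column_defs).get? f with
          | none => rfl
          | some c =>
              have hc2 := pvLookup_val column_defs f c hg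
              have : c ∈ seen.filterMap (pvLookupA column_defs).get? := by
                rw [pvMem_filterMap_g]; rw [hc2]; exact ⟨hg, hmem⟩
              simp [this]
        rw [hstep, hadd]; exact ih seen hnd
      · have hadd : PySem.Set.add seen f = seen ++ [f] := PySem.Set.add_of_not_mem hmem
        have hnd' : (PySem.Set.add seen f).Nodup := by
          rw [hadd]
          simp [List.nodup_append, hnd]
          intro a ha h
          exact hmem (h ▸ ha)
        have hstep : pvStepA (pvLookupA column_defs)
            (seen.filterMap (pvLookupA column_defs).get?) f
            = (PySem.Set.add seen f).filterMap (pvLookupA column_defs).get? := by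
          unfold pvStepA
          cases hg : (pvLookupA column_defs).get? f with
          | none => rw [hadd]; simp [hg]
          | some c =>
              have hc2 := pvLookup_val column_defs f c hg
              have hnotin : c ∉ seen.filterMap (pvLookupA column_defs).get? := by
                rw [pvMem_filterMap_g]; rw [hc2]; rintro ⟨_, h⟩; exact hmem h
              rw [hadd]; simp [hg, hnotin]
        rw [hstep]; exact ih _ hnd'

-- A computes filterMap over the ordered dedup of the requested fields
theorem pvA_eq_canon (column_defs : List (String × String)) (requested_fields : List String) :
    filter_export_columns_py column_defs requested_fields
      = (PySem.List.dedup requested_fields).filterMap (pvLookupA column_defs).get? := by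
  unfold filter_export_columns_py
  by_cases h : requested_fields = []
  · subst h; simp [PySem.List.dedup]
  · rw [if_neg h]
    have := pvLoopA column_defs requested_fields [] List.nodup_nil
    simpa [PySem.Set.update_nil_left] using this

-- keys of the rank dict, for any starting dict
theorem pvRank_keys_aux (l : List (Int × String)) :
    ∀ (d : PySem.Dict String Int),
      (l.foldl (fun d p => if d.contains p.2 then d else d.insert p.2 p.1) d).keys
        = PySem.Set.update d.keys (l.map (·.2)) := by
  induction l with
  | nil => intro d; simp [PySem.Set.update]
  | cons p rest ih =>
      intro d
      rw [List.foldl_cons, List.map_cons]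
      have hupd : PySem.Set.update d.keys (p.2 :: rest.map (·.2))
          = PySem.Set.update (PySem.Set.add d.keys p.2) (rest.map (·.2)) := by
        simp [PySem.Set.update]
      rw [hupd]
      by_cases hc : d.contains p.2
      · have : PySem.Set.add d.keys p.2 = d.keys :=
          PySem.Set.add_of_mem ((PySem.Dict.contains_iff_mem_keys d p.2).mp hc)
        rw [if_pos hc, ih d, this]
      · have hc' : d.contains p.2 = false := by simpa using hc
        have hadd : PySem.Set.add d.keys p.2 = d.keys ++ [p.2] :=
          PySem.Set.add_of_not_mem (fun hm => hc ((PySem.Dict.contains_iff_mem_keys d p.2).mpr hm))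
        rw [if_neg hc, ih, PySem.Dict.keys_insert_of_not_contains d p.1 hc', hadd]

theorem pvRank_keys (requested_fields : List String) :
    (pvRankB requested_fields).keys = PySem.List.dedup requested_fields := by
  unfold pvRankB
  rw [pvRank_keys_aux]
  simp [PySem.List.map_snd_enumerate, PySem.Set.update_nil_left]

theorem pvRank_keys_nodup (requested_fields : List String) :
    (pvRankB requested_fields).keys.Nodup := by
  rw [pvRank_keys]; exact PySem.List.nodup_dedup _

theorem pvRank_contains (requested_fields : List String) (f : String) :
    (pvRankB requested_fields).contains f = true ↔ f ∈ requested_fields := by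
  rw [PySem.Dict.contains_iff_mem_keys, pvRank_keys, PySem.List.mem_dedup]

-- the rank values are strictly increasing along the dict's item order
theorem pvRank_items_pairwise_aux (fs : List String) :
    ∀ (s : Int) (d : PySem.Dict String Int),
      (d.items.Pairwise fun p q => p.2 < q.2) → (∀ p ∈ d.items, p.2 < s) →
      (((PySem.List.enumerate fs s).foldl
          (fun d p => if d.contains p.2 then d else d.insert p.2 p.1) d).items.Pairwise
        fun p q => p.2 < q.2) := by
  induction fs with
  | nil => intro s d h _; simpa [PySem.List.enumerate_nil] using h
  | cons f rest ih =>
      intro s d hpair hlt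
      rw [PySem.List.enumerate_cons, List.foldl_cons]
      by_cases hc : d.contains f
      · rw [if_pos hc]
        exact ih (s + 1) d hpair (fun p hp => lt_trans (hlt p hp) (by omega))
      · rw [if_neg hc]
        have hc' : d.contains f = false := by simpa using hc
        have hitems := PySem.Dict.items_insert_of_not_contains d s hc'
        refine ih (s + 1) (d.insert f s) ?_ ?_
        · rw [hitems]
          rw [List.pairwise_append]
          refine ⟨hpair, by simp, ?_⟩
          intro p hp q hq
          simp at hq; rw [hq]
          exact hlt p hp
        · intro p hp
          rw [hitems] at hp
          rcases List.mem_append.mp hp with h | h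
          · exact lt_trans (hlt p h) (by omega)
          · simp at h; rw [h]; omega

theorem pvRank_items_pairwise (requested_fields : List String) :
    (pvRankB requested_fields).items.Pairwise fun p q => p.2 < q.2 := by
  unfold pvRankB
  refine pvRank_items_pairwise_aux requested_fields 0 PySem.Dict.empty ?_ ?_
  · simp [PySem.Dict.empty]
  · intro p hp; simp [PySem.Dict.empty] at hp

-- hence the dedup'd requested fields are strictly increasing under the rank key
theorem pvDedup_pairwise_rank (requested_fields : List String) :
    (PySem.List.dedup requested_fields).Pairwise
      (fun a b => (((pvRankB requested_fields).get? a).getD 0)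
                < (((pvRankB requested_fields).get? b).getD 0)) := by
  have hk := pvRank_keys requested_fields
  have hnd := pvRank_keys_nodup requested_fields
  have hpair := pvRank_items_pairwise requested_fields
  rw [← hk]
  have : (pvRankB requested_fields).keys
      = (pvRankB requested_fields).items.map (·.1) := rfl
  rw [this, List.pairwise_map]
  refine hpair.imp_of_mem ?_
  intro p q hp hq hlt
  have hgp : (pvRankB requested_fields).get? p.1 = some p.2 :=
    PySem.Dict.get?_of_mem_items _ hp hnd
  have hgq : (pvRankB requested_fields).get? q.1 = some q.2 :=
    PySem.Dict.get?_of_mem_items _ hq hnd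
  rw [hgp, hgq]; simpa using hlt

-- the candidate pool of B, named
def pvPool (column_defs : List (String × String)) (requested_fields : List String) : List (String × String) :=
  (((pvLookupA column_defs).items.filter
      (fun p => (pvRankB requested_fields).contains p.1)).map (·.2))

theorem pvItems_val (column_defs : List (String × String)) (k : String) (v : String × String)
    (h : (k, v) ∈ (pvLookupA column_defs).items) :
    (pvLookupA column_defs).get? k = some v ∧ v.2 = k := by
  have hg : (pvLookupA column_defs).get? k = some v :=
    PySem.Dict.get?_of_mem_items _ h (pvLookup_keys_nodup column_defs)
  exact ⟨hg, pvLookup_val column_defs k v hg⟩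

theorem pvMem_pool (column_defs : List (String × String)) (requested_fields : List String)
    (c : String × String) :
    c ∈ pvPool column_defs requested_fields ↔
      (pvLookupA column_defs).get? c.2 = some c ∧ c.2 ∈ requested_fields := by
  unfold pvPool
  rw [List.mem_map]
  constructor
  · rintro ⟨p, hp, hsnd⟩
    rw [List.mem_filter] at hp
    obtain ⟨hitems, hcont⟩ := hp
    obtain ⟨hg, hv2⟩ := pvItems_val column_defs p.1 p.2 (by simpa using hitems)
    subst hsnd
    constructor
    · rw [hv2]; exact hg
    · rw [hv2, ← pvRank_contains requested_fields p.1]; exact hcont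
  · rintro ⟨hg, hm⟩
    refine ⟨(c.2, c), ?_, rfl⟩
    rw [List.mem_filter]
    constructor
    · exact PySem.Dict.mem_items_of_get?_eq_some _ hg
    · simpa using (pvRank_contains requested_fields c.2).mpr hm

theorem pvPool_nodup (column_defs : List (String × String)) (requested_fields : List String) :
    (pvPool column_defs requested_fields).Nodup := by
  unfold pvPool
  have hkeys : ((pvLookupA column_defs).items.map (·.1)).Nodup :=
    pvLookup_keys_nodup column_defs
  have hitems : (pvLookupA column_defs).items.Nodup := hkeys.of_map
  have hfil : ((pvLookupA column_defs).items.filter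
      (fun p => (pvRankB requested_fields).contains p.1)).Nodup := hitems.filter _
  refine hfil.map_on ?_
  intro p hp q hq hpq
  rw [List.mem_filter] at hp hq
  obtain ⟨hgp, hvp⟩ := pvItems_val column_defs p.1 p.2 (by simpa using hp.1)
  obtain ⟨hgq, hvq⟩ := pvItems_val column_defs q.1 q.2 (by simpa using hq.1)
  have hk : p.1 = q.1 := by rw [← hvp, ← hvq, hpq]
  have hv : p.2 = q.2 := by
    have := hgp; rw [hk, hgq] at this; exact (Option.some.injEq _ _).mp this.symm
  exact Prod.ext hk hv

-- the canonical value, shared by both sides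
theorem pvCanon_mem (column_defs : List (String × String)) (requested_fields : List String)
    (c : String × String) :
    c ∈ (PySem.List.dedup requested_fields).filterMap (pvLookupA column_defs).get? ↔
      (pvLookupA column_defs).get? c.2 = some c ∧ c.2 ∈ requested_fields := by
  rw [pvMem_filterMap_g, PySem.List.mem_dedup]

theorem pvCanon_nodup (column_defs : List (String × String)) (requested_fields : List String) :
    ((PySem.List.dedup requested_fields).filterMap (pvLookupA column_defs).get?).Nodup := by
  refine List.Nodup.filterMap ?_ (PySem.List.nodup_dedup _)
  intro a a' b hb hb'
  have ha : (pvLookupA column_defs).get? a = some b := by simpa using hb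
  have ha' : (pvLookupA column_defs).get? a' = some b := by simpa using hb'
  rw [← pvLookup_val column_defs a b ha, ← pvLookup_val column_defs a' b ha']

theorem pvCanon_pairwise (column_defs : List (String × String)) (requested_fields : List String) :
    ((PySem.List.dedup requested_fields).filterMap (pvLookupA column_defs).get?).Pairwise
      (fun a b => (((pvRankB requested_fields).get? a.2).getD 0)
                < (((pvRankB requested_fields).get? b.2).getD 0)) := by
  refine List.Pairwise.filterMap _ ?_ (pvDedup_pairwise_rank requested_fields)
  intro a a' hlt b hb b' hb'
  have ha : (pvLookupA column_defs).get? a = some b := by simpa using hb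
  have ha' : (pvLookupA column_defs).get? a' = some b' := by simpa using hb'
  rw [pvLookup_val column_defs a b ha, pvLookup_val column_defs a' b' ha']
  exact hlt

theorem pvB_eq_canon (column_defs : List (String × String)) (requested_fields : List String) :
    filter_export_columns_py_alt column_defs requested_fields
      = (PySem.List.dedup requested_fields).filterMap (pvLookupA column_defs).get? := by
  show PySem.List.sorted (pvPool column_defs requested_fields)
      (fun col => (((pvRankB requested_fields).get? col.2).getD 0)) false = _
  refine PySem.List.sorted_eq_of_perm_of_pairwise_lt _ _ _ ?_ (pvCanon_pairwise column_defs requested_fields)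
  refine (List.perm_ext_iff_of_nodup (pvCanon_nodup _ _) (pvPool_nodup _ _)).mpr ?_
  intro c
  rw [pvCanon_mem, pvMem_pool]

-- ===== VERDICT (by name: the statement is the Claim_ definition above) =====
theorem filter_export_columns_py_spec : Claim_equal_filter_export_columns_py := by
  intro column_defs requested_fields _
  unfold Spec_filter_export_columns_py
  rw [pvA_eq_canon, pvB_eq_canon]
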